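-- pv_equiv track=rewrite | github.com/Mahmoud-a-shakra/mypythonproject | codereview.py | get_relevant_favourites
-- ===== SOURCE A (Python) =====
-- from collections import OrderedDict
--
-- def get_relevant_favourites(favourites):
--     favourites = OrderedDict(favourites)
--     to_delete = []
--     del favourites['total']
--     for favourite, years in reversed(favourites.items()):
--         if favourites_not_empty(years=years):
--             break
--         to_delete.append(favourite)
--     for favourite in to_delete:
--         del favourites[favourite]
--     return favourites
--
-- def favourites_not_empty(years):
--     for year, winners in years.items():
--         if winners > 0:
--             return True
--     return False
-- ===== SOURCE B (Python) =====
-- def get_relevant_favourites(favourites):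
--     favourites = dict(favourites)
--     del favourites['total']
--     items = list(favourites.items())
--     cutoff = 0
--     for i, (name, years) in enumerate(items):
--         if any(w > 0 for w in years.values()):
--             cutoff = i + 1
--     return dict(items[:cutoff])
-- ===== Notes on version B (the rewrite author's own statement) =====
-- stated objective: alternative
-- what changed: Replaces the reverse scan with early break plus a to-delete list and in-place deletions by a single forward pass over the items that tracks the cutoff index just after the last non-empty favourite, then rebuilds a fresh dict from that prefix; the KeyError on a missing 'total' key is preserved (excluded by Pre_).
import Mathlib
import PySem

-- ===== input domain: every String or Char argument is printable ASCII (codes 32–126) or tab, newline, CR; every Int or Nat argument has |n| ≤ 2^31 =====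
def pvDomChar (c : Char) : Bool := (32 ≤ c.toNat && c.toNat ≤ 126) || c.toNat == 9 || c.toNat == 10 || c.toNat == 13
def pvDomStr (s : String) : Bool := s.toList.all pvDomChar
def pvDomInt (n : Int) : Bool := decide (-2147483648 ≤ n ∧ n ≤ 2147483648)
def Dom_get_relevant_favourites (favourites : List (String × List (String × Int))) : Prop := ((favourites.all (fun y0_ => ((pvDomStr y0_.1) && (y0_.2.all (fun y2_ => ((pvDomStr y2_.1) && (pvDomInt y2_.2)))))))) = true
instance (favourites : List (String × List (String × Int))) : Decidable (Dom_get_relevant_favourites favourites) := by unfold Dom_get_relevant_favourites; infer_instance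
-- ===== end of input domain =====

-- B replaces A's reverse scan + in-place deletions by a forward pass tracking a cutoff index and a
-- rebuild of the prefix; same O(n) cost (objective: alternative). Equivalence of RETURN values only
-- (A mutates its local dict; the argument list is never mutated by either).

-- ===== PORT A =====
-- loop of favourites_not_empty: 'for year, winners in years.items(): if winners > 0: return True / return False'
def pvNotEmptyLoop : List (String × Int) → Bool
  | [] => false
  | (_, winners) :: rest => if winners > 0 then true else pvNotEmptyLoop rest

-- years is a Python dict (assoc list under the convention): iterate the dict's items
def favourites_not_empty (years : List (String × Int)) : Bool :=
  pvNotEmptyLoop (PySem.Dict.ofList years).items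

-- the first loop: reversed items, append until break at the first non-empty favourite
def pvCollectDelete : List (String × List (String × Int)) → List String
  | [] => []
  | (favourite, years) :: rest =>
      if favourites_not_empty years then [] else favourite :: pvCollectDelete rest

def get_relevant_favourites (favourites : List (String × List (String × Int))) : List (String × List (String × Int)) :=
  let d := PySem.Dict.ofList favourites
  -- del favourites['total']  (KeyError when 'total' is absent: excluded by Pre_)
  let d := d.erase "total"
  let to_delete := pvCollectDelete d.items.reverse
  let d := to_delete.foldl (fun d f => d.erase f) d
  d.items

-- ===== PORT B =====
-- any(w > 0 for w in years.values())
def pvAnyWinner (years : List (String × Int)) : Bool :=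
  (PySem.Dict.ofList years).values.any (fun w => decide (0 < w))

def get_relevant_favourites_alt (favourites : List (String × List (String × Int))) : List (String × List (String × Int)) :=
  let items := ((PySem.Dict.ofList favourites).erase "total").items
  let cutoff : Int := (PySem.List.enumerate items).foldl
      (fun c p => if pvAnyWinner p.2.2 then p.1 + 1 else c) 0
  (PySem.Dict.ofList (PySem.List.slice items none (some cutoff))).items

-- ===== PRECONDITION & SPEC =====
-- Pre_ excludes exactly the inputs with no 'total' key, on which Python A (and B) raise KeyError.
def Pre_get_relevant_favourites (favourites : List (String × List (String × Int))) : Prop :=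
  "total" ∈ favourites.map (·.1)
instance (favourites : List (String × List (String × Int))) : Decidable (Pre_get_relevant_favourites favourites) := by
  unfold Pre_get_relevant_favourites; infer_instance

def pvWitness_get_relevant_favourites : (List (String × List (String × Int))) :=
  [("total", [("2020", 3)]), ("x", [("2020", 0)])]

def Spec_get_relevant_favourites (favourites : List (String × List (String × Int))) (out : List (String × List (String × Int))) : Prop := out = get_relevant_favourites_alt favourites
instance (favourites : List (String × List (String × Int))) (out : List (String × List (String × Int))) : Decidable (Spec_get_relevant_favourites favourites out) := by unfold Spec_get_relevant_favourites; infer_instance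

-- ===== CLAIM (what is proved, stated in full; the proofs are below) =====
def Claim_equal_get_relevant_favourites : Prop := ∀ (favourites : List (String × List (String × Int))), Dom_get_relevant_favourites favourites → Pre_get_relevant_favourites favourites → Spec_get_relevant_favourites favourites (get_relevant_favourites favourites)

-- ===== LEMMAS AND PROOFS =====

-- the two emptiness tests agree
lemma pvLoop_eq_any (l : List (String × Int)) :
    pvNotEmptyLoop l = l.any (fun p => decide (0 < p.2)) := by
  induction l with
  | nil => rfl
  | cons p rest ih =>
      obtain ⟨k, w⟩ := p
      simp [pvNotEmptyLoop, ih]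

lemma pvNotEmpty_eq (ys : List (String × Int)) :
    favourites_not_empty ys = pvAnyWinner ys := by
  simp [favourites_not_empty, pvAnyWinner, PySem.Dict.values, List.any_map,
    pvLoop_eq_any, Function.comp_def]

-- A's first loop is takeWhile on the reversed items
lemma pvCollect_eq_takeWhile (r : List (String × List (String × Int))) :
    pvCollectDelete r = (r.takeWhile (fun e => !pvAnyWinner e.2)).map (·.1) := by
  induction r with
  | nil => rfl
  | cons e rest ih =>
      obtain ⟨f, ys⟩ := e
      simp only [pvCollectDelete, pvNotEmpty_eq, List.takeWhile_cons]
      by_cases h : pvAnyWinner ys <;> simp [h, ih]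

-- A's deletion loop is one filter
lemma pvFoldl_erase_items (names : List String)
    (d : PySem.Dict String (List (String × Int))) :
    (names.foldl (fun d f => d.erase f) d).items
      = d.items.filter (fun e => !names.contains e.1) := by
  induction names generalizing d with
  | nil => simp
  | cons n ns ih =>
      rw [List.foldl_cons, ih]
      simp only [PySem.Dict.erase, List.filter_filter]
      apply List.filter_congr
      intro e _
      simp only [List.contains_cons]
      by_cases h1 : e.1 = n <;> simp [h1, Bool.and_comm]

-- rebuilding a dict from a nodup-key item list gives back that list
lemma pvOfList_items_of_nodup (T : List (String × List (String × Int)))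
    (h : (T.map (·.1)).Nodup) : (PySem.Dict.ofList T).items = T := by
  have := PySem.Dict.items_foldl_insert_fresh (l := T) (d := PySem.Dict.empty)
      (k := fun a => a.1) (v := fun a => a.2)
      (by intro a _; simp) h
  simpa [PySem.Dict.ofList, PySem.Dict.update] using this

-- B's cutoff is the length of the kept prefix (= items minus the all-empty suffix)
lemma pvCutoff_eq (M : List (String × List (String × Int))) :
    ((PySem.List.enumerate M).foldl
        (fun c p => if pvAnyWinner p.2.2 then p.1 + 1 else c) 0)
      = ((M.reverse.dropWhile (fun e => !pvAnyWinner e.2)).length : Int) := by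
  induction M using List.reverseRecOn with
  | nil => rfl
  | append_singleton xs x ih =>
      rw [PySem.List.enumerate_append, List.foldl_append]
      simp only [PySem.List.enumerate_cons, PySem.List.enumerate_nil, List.foldl_cons,
        List.foldl_nil, List.reverse_append, List.reverse_cons, List.reverse_nil,
        List.nil_append, List.cons_append, List.dropWhile_cons]
      by_cases h : pvAnyWinner x.2 <;> simp [h, ih]

theorem get_relevant_favourites_spec : Claim_equal_get_relevant_favourites := by
  intro favourites _ _
  unfold Spec_get_relevant_favourites get_relevant_favourites get_relevant_favourites_alt
  dsimp only
  set L := ((PySem.Dict.ofList favourites).erase "total").items with hL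
  -- L has nodup keys
  have hnd : (L.map (·.1)).Nodup := by
    have h0 : ((PySem.Dict.ofList favourites).items.map (·.1)).Nodup :=
      PySem.Dict.nodup_keys_ofList favourites
    have hsub : List.Sublist (L.map (·.1)) ((PySem.Dict.ofList favourites).items.map (·.1)) := by
      rw [hL]; exact List.Sublist.map _ List.filter_sublist
    exact h0.sublist hsub
  set P : (String × List (String × Int)) → Bool := fun e => pvAnyWinner e.2 with hP
  set w := L.reverse.takeWhile (fun e => !P e) with hw
  set t := L.reverse.dropWhile (fun e => !P e) with ht
  have hsplit : L = t.reverse ++ w.reverse := by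
    have : L.reverse = w ++ t := (List.takeWhile_append_dropWhile).symm
    calc L = L.reverse.reverse := (List.reverse_reverse L).symm
      _ = (w ++ t).reverse := by rw [this]
      _ = t.reverse ++ w.reverse := by rw [List.reverse_append]
  -- A side
  have hA : (List.foldl (fun d f => d.erase f) ((PySem.Dict.ofList favourites).erase "total")
        (pvCollectDelete L.reverse)).items = t.reverse := by
    rw [pvFoldl_erase_items, ← hL, pvCollect_eq_takeWhile, ← hw]
    have hnd' := hnd
    rw [hsplit, List.map_append, List.nodup_append] at hnd'
    rw [hsplit, List.filter_append]
    have h1 : t.reverse.filter (fun e => !(w.map (·.1)).contains e.1) = t.reverse := by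
      apply List.filter_eq_self.mpr
      intro e he
      have : e.1 ∉ w.reverse.map (·.1) := by
        intro hmem
        exact hnd'.2.2 e.1 (List.mem_map_of_mem he) e.1 hmem rfl
      simp only [List.map_reverse, List.mem_reverse] at this
      simpa using this
    have h2 : w.reverse.filter (fun e => !(w.map (·.1)).contains e.1) = [] := by
      apply List.filter_eq_nil_iff.mpr
      intro e he
      have : e.1 ∈ w.map (·.1) := List.mem_map_of_mem (List.mem_reverse.mp he)
      simpa using this
    rw [h1, h2, List.append_nil]
  -- B side
  have hcut : ((PySem.List.enumerate L).foldl
      (fun c p => if pvAnyWinner p.2.2 then p.1 + 1 else c) 0) = (t.length : Int) := by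
    rw [pvCutoff_eq, ← ht]
  have hB : PySem.List.slice L none (some (t.length : Int)) = t.reverse := by
    rw [PySem.List.slice_to L (by positivity)]
    have : (t.length : Int).toNat = t.reverse.length := by simp
    rw [this, hsplit, List.take_left]
  have hndt : (t.reverse.map (·.1)).Nodup := by
    have := hnd
    rw [hsplit, List.map_append, List.nodup_append] at this
    exact this.1
  simp only [hA, hcut, hB, pvOfList_items_of_nodup t.reverse hndt]
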